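-- pv_equiv track=rewrite | github.com/wxdangel-ship-it/nav-road-pipeline | tools/download_dop20_wms.py | _select_layer
-- ===== SOURCE A (Python) =====
-- from typing import Dict, Iterable, List, Optional, Tuple
--
-- def _select_layer(layers: List[str]) -> Optional[str]:
--     if not layers:
--         return None
--     for name in layers:
--         upper = name.upper()
--         if "DOP" in upper and "RGB" in upper:
--             return name
--     for name in layers:
--         if "DOP" in name.upper():
--             return name
--     return layers[0]
-- ===== SOURCE B (Python) =====
-- from typing import List, Optional
--
-- def _select_layer(layers: List[str]) -> Optional[str]:
--     if not layers:
--         return None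
--     first_dop = None
--     for name in layers:
--         upper = name.upper()
--         if "DOP" in upper and "RGB" in upper:
--             return name
--         if "DOP" in upper and first_dop is None:
--             first_dop = name
--     return first_dop if first_dop is not None else layers[0]
-- ===== Notes on version B (the rewrite author's own statement) =====
-- stated objective: simpler
-- what changed: Replaces A's two sequential passes over the list by a single pass that returns a DOP+RGB match immediately while remembering the first DOP-only match as a fallback.
import Mathlib
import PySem

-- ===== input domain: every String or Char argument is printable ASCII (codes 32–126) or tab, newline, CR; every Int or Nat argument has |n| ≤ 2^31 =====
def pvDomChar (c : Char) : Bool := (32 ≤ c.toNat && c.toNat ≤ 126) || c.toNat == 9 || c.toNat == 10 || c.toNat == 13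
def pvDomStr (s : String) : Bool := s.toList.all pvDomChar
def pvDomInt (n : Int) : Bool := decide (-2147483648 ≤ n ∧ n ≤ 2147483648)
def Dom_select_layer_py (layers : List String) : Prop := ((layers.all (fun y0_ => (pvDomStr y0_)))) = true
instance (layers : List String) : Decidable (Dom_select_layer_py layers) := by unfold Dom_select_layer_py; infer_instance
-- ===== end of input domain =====

-- B replaces A's two sequential passes by one pass keeping the first DOP-only match as fallback (objective: simpler).

-- '"DOP" in name.upper()' and '"RGB" in name.upper()' (exact via PySem.Str)
def pvDop (name : String) : Bool := PySem.Str.isIn "DOP" (PySem.Str.upper name)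
def pvRgb (name : String) : Bool := PySem.Str.isIn "RGB" (PySem.Str.upper name)

-- ===== PORT A =====
-- the two for-loops with early return are List.find?; 'return layers[0]' at the end is the head x
def select_layer_py (layers : List String) : Option String :=
  match layers with
  | [] => none
  | x :: _ =>
    match layers.find? (fun name => pvDop name && pvRgb name) with
    | some n => some n
    | none =>
      match layers.find? (fun name => pvDop name) with
      | some n => some n
      | none => some x

-- ===== PORT B =====
-- the single loop of Source B, carrying first_dop; fb is layers[0], the final fallback
def selAltGo (l : List String) (firstDop : Option String) (fb : String) : String :=
  match l with
  | [] => firstDop.getD fb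
  | n :: rest =>
    if pvDop n && pvRgb n then n
    else if pvDop n && firstDop.isNone then selAltGo rest (some n) fb
    else selAltGo rest firstDop fb

def select_layer_py_alt (layers : List String) : Option String :=
  match layers with
  | [] => none
  | x :: _ => some (selAltGo layers none x)

-- ===== PRECONDITION & SPEC =====
def Spec_select_layer_py (layers : List String) (out : Option String) : Prop := out = select_layer_py_alt layers
instance (layers : List String) (out : Option String) : Decidable (Spec_select_layer_py layers out) := by unfold Spec_select_layer_py; infer_instance

-- ===== CLAIM (what is proved, stated in full; the proofs are below) =====
def Claim_equal_select_layer_py : Prop := ∀ (layers : List String), Dom_select_layer_py layers → Spec_select_layer_py layers (select_layer_py layers)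

-- ===== LEMMAS AND PROOFS =====
-- loop invariant: one pass with accumulator = first pass, then the accumulator, then the second pass, then fb
lemma selAltGo_eq (l : List String) (fd : Option String) (fb : String) :
    selAltGo l fd fb =
      match l.find? (fun n => pvDop n && pvRgb n) with
      | some n => n
      | none =>
        match fd with
        | some d => d
        | none =>
          match l.find? (fun n => pvDop n) with
          | some n => n
          | none => fb := by
  induction l generalizing fd with
  | nil => cases fd <;> rfl
  | cons n rest ih =>
    simp only [selAltGo, List.find?_cons]
    cases hd : pvDop n with
    | true =>
      cases hr : pvRgb n with
      | true => simp
      | false => cases fd <;> simp [ih]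
    | false => simp [ih]

-- ===== VERDICT (by name: the statement is the Claim_ definition above) =====
theorem select_layer_py_spec : Claim_equal_select_layer_py := by
  intro layers _
  unfold Spec_select_layer_py select_layer_py select_layer_py_alt
  cases layers with
  | nil => rfl
  | cons x xs =>
    dsimp only
    rw [selAltGo_eq]
    rcases h1 : (x :: xs).find? (fun n => pvDop n && pvRgb n) with _ | n
    · rcases h2 : (x :: xs).find? (fun n => pvDop n) with _ | m <;> simp_all
    · simp_all
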